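-- pv_equiv track=rewrite | github.com/chenthreee/BOM_Parser | new_api_test.py | split_dict_keys_into_lists
-- ===== SOURCE A (Python) =====
-- def split_dict_keys_into_lists(d):
--     keys = list(d.keys())  # 获取字典的所有键
--     result = []
--     temp_list = []
--
--     for key in keys:
--         temp_list.append(key)
--         if len(temp_list) == 3:
--             result.append(temp_list)
--             temp_list = []
--
--     # 将剩余的不足三个元素的列表添加到结果列表中
--     if temp_list:
--         result.append(temp_list)
--
--     return result
-- ===== SOURCE B (Python) =====
-- def split_dict_keys_into_lists(d):
--     keys = list(d.keys())
--     return [keys[i:i+3] for i in range(0, len(keys), 3)]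
-- ===== Notes on version B (the rewrite author's own statement) =====
-- stated objective: simpler
-- what changed: Replaces the stateful temp-list accumulator with its len==3 branch and trailing flush by a single stride-3 range over key indices with slicing, the final partial group falling out of the slice.
import Mathlib
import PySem

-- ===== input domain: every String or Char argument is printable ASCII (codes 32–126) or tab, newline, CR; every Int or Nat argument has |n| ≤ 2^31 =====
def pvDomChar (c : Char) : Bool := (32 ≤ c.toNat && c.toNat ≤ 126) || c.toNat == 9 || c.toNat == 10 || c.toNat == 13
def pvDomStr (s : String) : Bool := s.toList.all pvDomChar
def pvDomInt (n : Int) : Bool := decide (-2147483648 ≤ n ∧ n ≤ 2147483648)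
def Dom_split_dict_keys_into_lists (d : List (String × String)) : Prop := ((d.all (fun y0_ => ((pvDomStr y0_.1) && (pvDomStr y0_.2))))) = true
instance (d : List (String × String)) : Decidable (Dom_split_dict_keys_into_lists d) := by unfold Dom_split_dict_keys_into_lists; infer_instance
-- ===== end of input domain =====

-- B replaces A's stateful temp-list accumulator (len==3 branch + trailing flush)
-- by a stride-3 index range with slicing: simpler, same cost.

-- ===== PORT A =====
-- the for-loop over keys with (result, temp_list) state, then the trailing flush
def splitLoopA (keys : List String) (result : List (List String)) (temp : List String) : List (List String) :=
  match keys with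
  | [] => if temp = [] then result else result ++ [temp]
  | k :: rest =>
    let t := temp ++ [k]
    if t.length = 3 then splitLoopA rest (result ++ [t]) [] else splitLoopA rest result t

def split_dict_keys_into_lists (d : List (String × String)) : List (List String) :=
  splitLoopA (PySem.List.dedup (d.map Prod.fst)) [] []

-- ===== PORT B =====
def split_dict_keys_into_lists_alt (d : List (String × String)) : List (List String) :=
  let keys := PySem.List.dedup (d.map Prod.fst)
  (PySem.List.pyRange 0 keys.length 3).map
    (fun i => PySem.List.slice keys (some i) (some (i + 3)))

-- ===== PRECONDITION & SPEC =====
def Spec_split_dict_keys_into_lists (d : List (String × String)) (out : List (List String)) : Prop := out = split_dict_keys_into_lists_alt d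
instance (d : List (String × String)) (out : List (List String)) : Decidable (Spec_split_dict_keys_into_lists d out) := by unfold Spec_split_dict_keys_into_lists; infer_instance

-- ===== CLAIM (what is proved, stated in full; the proofs are below) =====
def Claim_equal_split_dict_keys_into_lists : Prop := ∀ (d : List (String × String)), Dom_split_dict_keys_into_lists d → Spec_split_dict_keys_into_lists d (split_dict_keys_into_lists d)

-- ===== LEMMAS AND PROOFS =====

-- reference chunking: groups of three, last group possibly short
def chunk3 : List String → List (List String)
  | [] => []
  | x :: xs => (x :: xs.take 2) :: chunk3 (xs.drop 2)
termination_by xs => xs.length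
decreasing_by simp [List.length_drop]

theorem chunk3_nil : chunk3 [] = [] := by rw [chunk3]

theorem chunk3_cons (x : String) (xs : List String) :
    chunk3 (x :: xs) = (x :: xs.take 2) :: chunk3 (xs.drop 2) := by rw [chunk3]

theorem splitLoopA_append (ks : List String) (r1 r2 : List (List String)) (t : List String) :
    splitLoopA ks (r1 ++ r2) t = r1 ++ splitLoopA ks r2 t := by
  induction ks generalizing r2 t with
  | nil => simp only [splitLoopA]; split <;> simp
  | cons k rest ih =>
    simp only [splitLoopA]
    split
    · rw [List.append_assoc, ih]
    · exact ih _ _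

theorem splitLoopA_eq_chunk3 (ks : List String) : splitLoopA ks [] [] = chunk3 ks := by
  induction hn : ks.length using Nat.strong_induction_on generalizing ks with
  | _ n ih =>
    match ks with
    | [] => simp [splitLoopA, chunk3_nil]
    | [a] => simp [splitLoopA, chunk3_cons, chunk3_nil]
    | [a, b] => simp [splitLoopA, chunk3_cons, chunk3_nil]
    | a :: b :: c :: rest =>
      have h1 : splitLoopA (a :: b :: c :: rest) [] [] = splitLoopA rest [[a, b, c]] [] := by
        simp [splitLoopA]
      have h2 : splitLoopA rest [[a, b, c]] [] = [[a, b, c]] ++ splitLoopA rest [] [] := by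
        have h := splitLoopA_append rest [[a, b, c]] [] []
        simpa using h
      have hlt : rest.length < n := by subst hn; simp; omega
      rw [h1, h2, ih rest.length hlt rest rfl, chunk3_cons]
      simp

theorem range_chunk_eq_chunk3 (ks : List String) :
    (List.range ((ks.length + 2) / 3)).map (fun k => (ks.drop (3 * k)).take 3) = chunk3 ks := by
  induction hn : ks.length using Nat.strong_induction_on generalizing ks with
  | _ n ih =>
    match ks with
    | [] => subst hn; simp [chunk3_nil]
    | [a] =>
      subst hn
      rw [show ([a].length + 2) / 3 = 1 by norm_num]
      simp [List.range_succ, chunk3_cons, chunk3_nil]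
    | [a, b] =>
      subst hn
      rw [show ([a, b].length + 2) / 3 = 1 by norm_num]
      simp [List.range_succ, chunk3_cons, chunk3_nil]
    | a :: b :: c :: rest =>
      subst hn
      have hcount : ((a :: b :: c :: rest).length + 2) / 3 = (rest.length + 2) / 3 + 1 := by
        have h3 : (a :: b :: c :: rest).length + 2 = rest.length + 2 + 3 := by
          simp only [List.length_cons]
        rw [h3, Nat.add_div_right]
        norm_num
      rw [hcount]
      rw [List.range_succ_eq_map]
      rw [List.map_cons]
      rw [List.map_map]
      have htail : ∀ k : Nat, ((a :: b :: c :: rest).drop (3 * (k + 1))).take 3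
          = (rest.drop (3 * k)).take 3 := by
        intro k
        have hd : (a :: b :: c :: rest).drop (3 * (k + 1)) = rest.drop (3 * k) := by
          rw [show 3 * (k + 1) = 3 * k + 3 by ring, ← List.drop_drop]
          simp
        rw [hd]
      have hmap : (List.range ((rest.length + 2) / 3)).map
            ((fun k => ((a :: b :: c :: rest).drop (3 * k)).take 3) ∘ (fun i => i + 1))
          = (List.range ((rest.length + 2) / 3)).map (fun k => (rest.drop (3 * k)).take 3) :=
        List.map_congr_left (fun k _ => htail k)
      rw [hmap]
      have hlt : rest.length < (a :: b :: c :: rest).length := by simp only [List.length_cons]; omega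
      rw [ih rest.length hlt rest rfl, chunk3_cons]
      simp

theorem alt_eq_chunk3 (ks : List String) :
    (PySem.List.pyRange 0 ks.length 3).map (fun i => PySem.List.slice ks (some i) (some (i + 3)))
      = chunk3 ks := by
  rw [PySem.List.pyRange_of_pos 0 (ks.length : Int) (by norm_num)]
  rw [← range_chunk_eq_chunk3 ks, List.map_map]
  have hcnt : (if (0 : Int) < ks.length then (((ks.length : Int) - 0 + 3 - 1) / 3).toNat else 0)
      = (ks.length + 2) / 3 := by
    split
    · rw [show ((ks.length : Int) - 0 + 3 - 1) = ((ks.length + 2 : Nat) : Int) by push_cast; ring]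
      rw [show ((3 : Int)) = ((3 : Nat) : Int) from rfl, ← Int.natCast_div, Int.toNat_natCast]
    · rename_i h
      have h0 : ks.length = 0 := by omega
      simp [h0]
  rw [hcnt]
  apply List.map_congr_left
  intro k _
  show PySem.List.slice ks (some (0 + 3 * (k : Int))) (some (0 + 3 * (k : Int) + 3)) = (ks.drop (3 * k)).take 3
  have h2 : (0 : Int) + 3 * (k : Int) + 3 = ((3 * k : Nat) : Int) + ((3 : Nat) : Int) := by push_cast; ring
  have h1 : (0 : Int) + 3 * (k : Int) = ((3 * k : Nat) : Int) := by push_cast; ring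
  rw [h2, h1, PySem.List.slice_natCast_add]

-- ===== VERDICT (by name: the statement is the Claim_ definition above) =====
theorem split_dict_keys_into_lists_spec : Claim_equal_split_dict_keys_into_lists := by
  intro d _
  unfold Spec_split_dict_keys_into_lists split_dict_keys_into_lists split_dict_keys_into_lists_alt
  rw [splitLoopA_eq_chunk3, alt_eq_chunk3]
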